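-- pv_equiv track=rewrite | github.com/turvik0/algorithms_mipt | week9_10/tourist.py | tourist
-- ===== SOURCE A (Python) =====
-- def tourist(n, m, falsee, truee):
--     listnum = [[0] * (m + 1) for _ in range(n + 1)]
--     for i in range(1, n + 1): listnum[i][0] = listnum[i - 1][0] + falsee[i - 1][0]
--     for j in range(1, m + 1): listnum[0][j] = listnum[0][j - 1] + truee[0][j - 1]
--     for i in range(1, n + 1):
--         for j in range(1, m + 1):
--             listnum[i][j] = max(listnum[i - 1][j] + falsee[i - 1][j], listnum[i][j - 1] + truee[i][j - 1])
--     return listnum[n][m]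
-- ===== SOURCE B (Python) =====
-- def tourist(n, m, falsee, truee):
--     # top-down memoized recursion over the path recurrence: f(i, j) is the max
--     # path value reaching cell (i, j), computed on demand and cached in a dict
--     memo = {}
--
--     def f(i, j):
--         if (i, j) in memo:
--             return memo[(i, j)]
--         if i == 0 and j == 0:
--             v = 0
--         elif j == 0:
--             v = f(i - 1, 0) + falsee[i - 1][0]
--         elif i == 0:
--             v = f(0, j - 1) + truee[0][j - 1]
--         else:
--             v = max(f(i - 1, j) + falsee[i - 1][j], f(i, j - 1) + truee[i][j - 1])
--         memo[(i, j)] = v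
--         return v
--
--     return f(n, m)
-- ===== Notes on version B (the rewrite author's own statement) =====
-- stated objective: alternative
-- what changed: B replaces A's bottom-up (n+1)x(m+1) table filled by three staged index loops with a top-down memoized recursion: a recursive f(i,j) computing the max path value on demand, cached in a dict, with no table and no index loops.
import Mathlib
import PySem

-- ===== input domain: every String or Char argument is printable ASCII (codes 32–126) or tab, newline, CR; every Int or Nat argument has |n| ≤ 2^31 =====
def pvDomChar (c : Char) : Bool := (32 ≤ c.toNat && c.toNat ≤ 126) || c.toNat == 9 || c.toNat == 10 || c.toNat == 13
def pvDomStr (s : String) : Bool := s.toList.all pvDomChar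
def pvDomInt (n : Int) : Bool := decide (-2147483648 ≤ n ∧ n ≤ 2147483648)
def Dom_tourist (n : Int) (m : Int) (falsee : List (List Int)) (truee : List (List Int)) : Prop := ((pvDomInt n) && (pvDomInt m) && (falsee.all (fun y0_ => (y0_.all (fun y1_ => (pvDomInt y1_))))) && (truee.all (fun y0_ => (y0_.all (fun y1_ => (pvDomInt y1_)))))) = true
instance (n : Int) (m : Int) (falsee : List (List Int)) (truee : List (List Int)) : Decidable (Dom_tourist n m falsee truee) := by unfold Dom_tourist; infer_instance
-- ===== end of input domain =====

-- B replaces A's bottom-up staged table fills with a top-down memoized recursion (objective: alternative decomposition, same O(n·m) cost).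

-- ===== PORT A =====
-- Python L[i][j] read / write with nonnegative indices (exact on Pre_, where every index A uses is in range)
def get2 (L : List (List Int)) (i j : Nat) : Int := (L.getD i []).getD j 0
def set2 (L : List (List Int)) (i j : Nat) (v : Int) : List (List Int) :=
  L.set i ((L.getD i []).set j v)
-- the four loop bodies of A, named so the proofs below can speak about them
def stepCol (F : List (List Int)) (L : List (List Int)) (i : Nat) : List (List Int) :=
  set2 L (i+1) 0 (get2 L i 0 + get2 F i 0)
def stepRowA (T : List (List Int)) (L : List (List Int)) (j : Nat) : List (List Int) :=
  set2 L 0 (j+1) (get2 L 0 j + get2 T 0 j)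
def stepCell (F T : List (List Int)) (i : Nat) (L : List (List Int)) (j : Nat) : List (List Int) :=
  set2 L (i+1) (j+1) (max (get2 L i (j+1) + get2 F i (j+1)) (get2 L (i+1) j + get2 T (i+1) j))
def stepOuter (F T : List (List Int)) (M : Nat) (L : List (List Int)) (i : Nat) : List (List Int) :=
  (List.range M).foldl (stepCell F T i) L

def tourist (n : Int) (m : Int) (falsee : List (List Int)) (truee : List (List Int)) : Int :=
  if n < 0 ∨ m < 0 then 0 else  -- totality guard only: Python A raises for negative n or m (outside Pre_)
    let N := n.toNat
    let M := m.toNat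
    let L0 := List.replicate (N+1) (List.replicate (M+1) (0:Int))
    let L1 := (List.range N).foldl (stepCol falsee) L0
    let L2 := (List.range M).foldl (stepRowA truee) L1
    let L3 := (List.range N).foldl (stepOuter falsee truee M) L2
    get2 L3 N M

-- ===== PORT B =====
-- the memoized recursive f of Source B; the Python closure's mutable memo dict is threaded as state
def fB (F T : List (List Int)) (i j : Nat) (d : PySem.Dict (Nat × Nat) Int) :
    Int × PySem.Dict (Nat × Nat) Int :=
  match d.get? (i, j) with
  | some v => (v, d)
  | none =>
    let r : Int × PySem.Dict (Nat × Nat) Int :=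
      if _h0 : i = 0 ∧ j = 0 then (0, d)
      else if _hj : j = 0 then
        let p := fB F T (i - 1) 0 d
        (p.1 + get2 F (i - 1) 0, p.2)
      else if _hi : i = 0 then
        let p := fB F T 0 (j - 1) d
        (p.1 + get2 T 0 (j - 1), p.2)
      else
        let p := fB F T (i - 1) j d
        let q := fB F T i (j - 1) p.2
        (max (p.1 + get2 F (i - 1) j) (q.1 + get2 T i (j - 1)), q.2)
    (r.1, r.2.insert (i, j) r.1)
termination_by i + j
decreasing_by all_goals omega

def tourist_alt (n : Int) (m : Int) (falsee : List (List Int)) (truee : List (List Int)) : Int :=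
  if n < 0 ∨ m < 0 then 0 else  -- totality guard only: Python B does not terminate normally for negative n or m (outside Pre_)
    (fB falsee truee n.toNat m.toNat PySem.Dict.empty).1

-- ===== PRECONDITION & SPEC =====
-- Pre_ is exactly where Python A returns normally: n, m ≥ 0 and the falsee/truee rows A indexes are
-- long enough (otherwise A raises IndexError).
def Pre_tourist (n : Int) (m : Int) (falsee : List (List Int)) (truee : List (List Int)) : Prop :=
  0 ≤ n ∧ 0 ≤ m ∧
  (0 < n → n.toNat ≤ falsee.length ∧
    ∀ r ∈ falsee.take n.toNat, (if 0 < m then m.toNat + 1 else 1) ≤ r.length) ∧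
  (0 < m → n.toNat + 1 ≤ truee.length ∧
    ∀ r ∈ truee.take (n.toNat + 1), m.toNat ≤ r.length)
instance (n : Int) (m : Int) (falsee : List (List Int)) (truee : List (List Int)) : Decidable (Pre_tourist n m falsee truee) := by unfold Pre_tourist; infer_instance

def pvWitness_tourist : Int × Int × List (List Int) × List (List Int) := (1, 1, [[5, 6]], [[7], [8]])

def Spec_tourist (n : Int) (m : Int) (falsee : List (List Int)) (truee : List (List Int)) (out : Int) : Prop := out = tourist_alt n m falsee truee
instance (n : Int) (m : Int) (falsee : List (List Int)) (truee : List (List Int)) (out : Int) : Decidable (Spec_tourist n m falsee truee out) := by unfold Spec_tourist; infer_instance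

-- ===== CLAIM (what is proved, stated in full; the proofs are below) =====
def Claim_equal_tourist : Prop := ∀ (n : Int) (m : Int) (falsee : List (List Int)) (truee : List (List Int)), Dom_tourist n m falsee truee → Pre_tourist n m falsee truee → Spec_tourist n m falsee truee (tourist n m falsee truee)

-- ===== LEMMAS AND PROOFS =====

-- the common Bellman value: g F T i j = max path value reaching cell (i, j)
def g (F T : List (List Int)) : Nat → Nat → Int
  | 0, 0 => 0
  | i+1, 0 => g F T i 0 + get2 F i 0
  | 0, j+1 => g F T 0 j + get2 T 0 j
  | i+1, j+1 => max (g F T i (j+1) + get2 F i (j+1)) (g F T (i+1) j + get2 T (i+1) j)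
termination_by i j => i + j

-- basic facts about get2 / set2
theorem length_set2 (L : List (List Int)) (i j : Nat) (v : Int) :
    (set2 L i j v).length = L.length := by
  simp [set2]

theorem rowlen_set2 (L : List (List Int)) (i j i' : Nat) (v : Int) :
    ((set2 L i j v).getD i' []).length = (L.getD i' []).length := by
  by_cases h : i' = i
  · subst h
    by_cases hi : i' < L.length
    · simp [set2, List.getD_eq_getElem?_getD, hi]
    · simp [set2, List.set_eq_of_length_le (Nat.le_of_not_lt hi)]
  · simp [set2, List.getD_eq_getElem?_getD, List.getElem?_set_ne (fun hh => h hh.symm)]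

theorem get2_set2_self (L : List (List Int)) (i j : Nat) (v : Int)
    (hi : i < L.length) (hj : j < (L.getD i []).length) :
    get2 (set2 L i j v) i j = v := by
  have hrow : L.getD i [] = L[i] := by
    simp [List.getD_eq_getElem?_getD, List.getElem?_eq_getElem hi]
  rw [hrow] at hj
  simp [get2, set2, List.getD_eq_getElem?_getD, hi, hj]

theorem get2_set2_ne (L : List (List Int)) (i j i' j' : Nat) (v : Int)
    (h : i ≠ i' ∨ j ≠ j') :
    get2 (set2 L i j v) i' j' = get2 L i' j' := by
  rcases h with h | h
  · simp [get2, set2, List.getD_eq_getElem?_getD, List.getElem?_set_ne h]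
  · by_cases hii : i = i'
    · subst hii
      by_cases hlen : i < L.length
      · simp [get2, set2, List.getD_eq_getElem?_getD, hlen, List.getElem?_set_ne h]
      · simp [get2, set2, List.set_eq_of_length_le (Nat.le_of_not_lt hlen)]
    · simp [get2, set2, List.getD_eq_getElem?_getD, List.getElem?_set_ne hii]

-- Shape L N M: the table has N+1 rows of length M+1 each
def Shape (L : List (List Int)) (N M : Nat) : Prop :=
  L.length = N + 1 ∧ ∀ i ≤ N, (L.getD i []).length = M + 1

theorem shape_set2 (L : List (List Int)) (N M i j : Nat) (v : Int)
    (hS : Shape L N M) : Shape (set2 L i j v) N M :=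
  ⟨by rw [length_set2]; exact hS.1, fun i' hi' => by rw [rowlen_set2]; exact hS.2 i' hi'⟩

theorem get2_set2_shape (L : List (List Int)) (N M i j i' j' : Nat) (v : Int)
    (hS : Shape L N M) (hi : i ≤ N) (hj : j ≤ M) :
    get2 (set2 L i j v) i' j' = if i' = i ∧ j' = j then v else get2 L i' j' := by
  split_ifs with h
  · obtain ⟨rfl, rfl⟩ := h
    exact get2_set2_self L i' j' v (by rw [hS.1]; omega) (by rw [hS.2 i' hi]; omega)
  · exact get2_set2_ne L i j i' j' v (by tauto)

-- A side, stage 0: the all-zero table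
theorem stage0 (N M : Nat) :
    Shape (List.replicate (N+1) (List.replicate (M+1) (0:Int))) N M ∧
    ∀ i ≤ N, ∀ j ≤ M, get2 (List.replicate (N+1) (List.replicate (M+1) (0:Int))) i j = 0 := by
  constructor
  · exact ⟨by simp, fun i hi => by
      simp [List.getD_eq_getElem?_getD, Nat.lt_succ_of_le hi]⟩
  · intro i hi j hj
    simp [get2, List.getD_eq_getElem?_getD, Nat.lt_succ_of_le hi, Nat.lt_succ_of_le hj]

-- A side, stage 1: the first column
theorem stage1 (F T : List (List Int)) (N M : Nat) (k : Nat) (hk : k ≤ N) :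
    Shape ((List.range k).foldl (stepCol F) (List.replicate (N+1) (List.replicate (M+1) (0:Int)))) N M ∧
    ∀ i ≤ N, ∀ j ≤ M,
      get2 ((List.range k).foldl (stepCol F) (List.replicate (N+1) (List.replicate (M+1) (0:Int)))) i j
        = if j = 0 ∧ i ≤ k then g F T i 0 else 0 := by
  induction k with
  | zero =>
    obtain ⟨hS, hv⟩ := stage0 N M
    refine ⟨by simpa using hS, fun i hi j hj => ?_⟩
    simp only [List.range_zero, List.foldl_nil]
    rw [hv i hi j hj]
    split_ifs with h
    · obtain ⟨rfl, hi0⟩ := h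
      interval_cases i
      simp [g]
    · rfl
  | succ k ih =>
    have hk' : k ≤ N := by omega
    obtain ⟨hS, hv⟩ := ih hk'
    rw [List.range_succ, List.foldl_append]
    simp only [List.foldl_cons, List.foldl_nil]
    set L := (List.range k).foldl (stepCol F) (List.replicate (N+1) (List.replicate (M+1) (0:Int)))
    refine ⟨shape_set2 _ _ _ _ _ _ hS, fun i hi j hj => ?_⟩
    have hval : get2 L k 0 + get2 F k 0 = g F T (k+1) 0 := by
      rw [hv k hk' 0 (Nat.zero_le M)]
      simp [g]
    rw [stepCol, get2_set2_shape _ N M _ _ _ _ _ hS (by omega) (Nat.zero_le M), hval]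
    by_cases h : i = k+1 ∧ j = 0
    · obtain ⟨rfl, rfl⟩ := h
      rw [if_pos ⟨rfl, rfl⟩, if_pos ⟨rfl, le_refl _⟩]
    · rw [if_neg h, hv i hi j hj]
      by_cases hj0 : j = 0
      · subst hj0
        have hik1 : i ≠ k+1 := fun hc => h ⟨hc, rfl⟩
        by_cases hik : i ≤ k
        · rw [if_pos ⟨rfl, hik⟩, if_pos ⟨rfl, by omega⟩]
        · rw [if_neg (fun hc => hik hc.2), if_neg (fun hc => absurd hc.2 (by omega))]
      · rw [if_neg (fun hc => hj0 hc.1), if_neg (fun hc => hj0 hc.1)]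

-- A side, stage 2: the first row (on top of the finished first column)
theorem stage2 (F T : List (List Int)) (N M : Nat) (k : Nat) (hk : k ≤ M) :
    Shape ((List.range k).foldl (stepRowA T)
      ((List.range N).foldl (stepCol F) (List.replicate (N+1) (List.replicate (M+1) (0:Int))))) N M ∧
    ∀ i ≤ N, ∀ j ≤ M,
      get2 ((List.range k).foldl (stepRowA T)
        ((List.range N).foldl (stepCol F) (List.replicate (N+1) (List.replicate (M+1) (0:Int))))) i j
        = if j = 0 then g F T i 0 else if i = 0 ∧ j ≤ k then g F T 0 j else 0 := by
  induction k with
  | zero =>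
    obtain ⟨hS, hv⟩ := stage1 F T N M N le_rfl
    refine ⟨by simpa using hS, fun i hi j hj => ?_⟩
    simp only [List.range_zero, List.foldl_nil]
    rw [hv i hi j hj]
    by_cases hj0 : j = 0
    · subst hj0
      rw [if_pos ⟨rfl, hi⟩, if_pos rfl]
    · rw [if_neg (fun hc => hj0 hc.1), if_neg hj0, if_neg (fun hc => hj0 (by omega))]
  | succ k ih =>
    have hk' : k ≤ M := by omega
    obtain ⟨hS, hv⟩ := ih hk'
    rw [List.range_succ, List.foldl_append]
    simp only [List.foldl_cons, List.foldl_nil]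
    set L := (List.range k).foldl (stepRowA T)
      ((List.range N).foldl (stepCol F) (List.replicate (N+1) (List.replicate (M+1) (0:Int))))
    refine ⟨shape_set2 _ _ _ _ _ _ hS, fun i hi j hj => ?_⟩
    have hval : get2 L 0 k + get2 T 0 k = g F T 0 (k+1) := by
      rw [hv 0 (Nat.zero_le N) k hk']
      by_cases hk0 : k = 0
      · subst hk0
        simp [g]
      · rw [if_neg hk0, if_pos ⟨rfl, le_refl k⟩]
        simp [g]
    rw [stepRowA, get2_set2_shape _ N M _ _ _ _ _ hS (Nat.zero_le N) (by omega), hval]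
    by_cases h : i = 0 ∧ j = k+1
    · obtain ⟨rfl, rfl⟩ := h
      rw [if_pos ⟨rfl, rfl⟩, if_neg (by omega), if_pos ⟨rfl, le_refl _⟩]
    · rw [if_neg h, hv i hi j hj]
      by_cases hj0 : j = 0
      · subst hj0
        rw [if_pos rfl, if_pos rfl]
      · rw [if_neg hj0, if_neg hj0]
        by_cases h2 : i = 0 ∧ j ≤ k
        · rw [if_pos h2, if_pos ⟨h2.1, by omega⟩]
        · rw [if_neg h2, if_neg (fun hc => h2 ⟨hc.1, by
            have hne : j ≠ k+1 := fun hj1 => h ⟨hc.1, hj1⟩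
            omega⟩)]

-- A side, stage 3 inner loop: filling row k+1 cell by cell
theorem stage3_inner (F T : List (List Int)) (N M k : Nat) (hk : k + 1 ≤ N)
    (L : List (List Int)) (hS : Shape L N M)
    (hv : ∀ i ≤ N, ∀ j ≤ M, get2 L i j = if i ≤ k ∨ j = 0 then g F T i j else 0) :
    ∀ t ≤ M, Shape ((List.range t).foldl (stepCell F T k) L) N M ∧
      ∀ i ≤ N, ∀ j ≤ M, get2 ((List.range t).foldl (stepCell F T k) L) i j
        = if i ≤ k ∨ j = 0 ∨ (i = k+1 ∧ j ≤ t) then g F T i j else 0 := by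
  intro t
  induction t with
  | zero =>
    intro _
    refine ⟨by simpa using hS, fun i hi j hj => ?_⟩
    simp only [List.range_zero, List.foldl_nil]
    rw [hv i hi j hj]
    have hiff : (i ≤ k ∨ j = 0 ∨ (i = k+1 ∧ j ≤ 0)) ↔ (i ≤ k ∨ j = 0) := by omega
    simp only [hiff]
  | succ t ih =>
    intro ht
    have ht' : t ≤ M := by omega
    obtain ⟨hS', hv'⟩ := ih ht'
    rw [List.range_succ, List.foldl_append]
    simp only [List.foldl_cons, List.foldl_nil]
    set L' := (List.range t).foldl (stepCell F T k) L
    refine ⟨shape_set2 _ _ _ _ _ _ hS', fun i hi j hj => ?_⟩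
    have hup : get2 L' k (t+1) = g F T k (t+1) := by
      rw [hv' k (by omega) (t+1) ht, if_pos (Or.inl le_rfl)]
    have hleft : get2 L' (k+1) t = g F T (k+1) t := by
      rw [hv' (k+1) hk t ht']
      by_cases ht0 : t = 0
      · subst ht0
        rw [if_pos (Or.inr (Or.inl rfl))]
      · rw [if_pos (Or.inr (Or.inr ⟨rfl, le_refl t⟩))]
    have hval : max (get2 L' k (t+1) + get2 F k (t+1)) (get2 L' (k+1) t + get2 T (k+1) t)
        = g F T (k+1) (t+1) := by
      rw [hup, hleft]
      simp [g]
    rw [stepCell, get2_set2_shape _ N M _ _ _ _ _ hS' hk ht, hval]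
    by_cases h : i = k+1 ∧ j = t+1
    · obtain ⟨rfl, rfl⟩ := h
      rw [if_pos ⟨rfl, rfl⟩, if_pos (Or.inr (Or.inr ⟨rfl, le_refl _⟩))]
    · rw [if_neg h, hv' i hi j hj]
      have hiff : (i ≤ k ∨ j = 0 ∨ (i = k+1 ∧ j ≤ t+1)) ↔ (i ≤ k ∨ j = 0 ∨ (i = k+1 ∧ j ≤ t)) := by
        constructor
        · rintro (h1 | h1 | ⟨h1, h2⟩)
          · exact Or.inl h1
          · exact Or.inr (Or.inl h1)
          · rcases Nat.lt_or_ge j (t+1) with hlt | hge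
            · exact Or.inr (Or.inr ⟨h1, by omega⟩)
            · exact absurd ⟨h1, by omega⟩ h
        · rintro (h1 | h1 | ⟨h1, h2⟩)
          · exact Or.inl h1
          · exact Or.inr (Or.inl h1)
          · exact Or.inr (Or.inr ⟨h1, by omega⟩)
      simp only [hiff]

-- A side, stage 3: the nested loop completes the table row by row
theorem stage3 (F T : List (List Int)) (N M : Nat) (k : Nat) (hk : k ≤ N) :
    Shape ((List.range k).foldl (stepOuter F T M)
      ((List.range M).foldl (stepRowA T)
        ((List.range N).foldl (stepCol F) (List.replicate (N+1) (List.replicate (M+1) (0:Int)))))) N M ∧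
    ∀ i ≤ N, ∀ j ≤ M,
      get2 ((List.range k).foldl (stepOuter F T M)
        ((List.range M).foldl (stepRowA T)
          ((List.range N).foldl (stepCol F) (List.replicate (N+1) (List.replicate (M+1) (0:Int)))))) i j
        = if i ≤ k ∨ j = 0 then g F T i j else 0 := by
  induction k with
  | zero =>
    obtain ⟨hS, hv⟩ := stage2 F T N M M le_rfl
    refine ⟨by simpa using hS, fun i hi j hj => ?_⟩
    simp only [List.range_zero, List.foldl_nil]
    rw [hv i hi j hj]
    by_cases hj0 : j = 0
    · subst hj0
      rw [if_pos rfl, if_pos (Or.inr rfl)]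
    · rw [if_neg hj0]
      by_cases hi0 : i = 0
      · subst hi0
        rw [if_pos ⟨rfl, hj⟩, if_pos (Or.inl le_rfl)]
      · rw [if_neg (fun hc => hi0 hc.1), if_neg (by omega)]
  | succ k ih =>
    have hk' : k ≤ N := by omega
    obtain ⟨hS, hv⟩ := ih hk'
    rw [List.range_succ, List.foldl_append]
    simp only [List.foldl_cons, List.foldl_nil]
    obtain ⟨hS', hv'⟩ := stage3_inner F T N M k hk _ hS hv M le_rfl
    refine ⟨hS', fun i hi j hj => ?_⟩
    rw [stepOuter, hv' i hi j hj]
    have hiff : (i ≤ k ∨ j = 0 ∨ (i = k+1 ∧ j ≤ M)) ↔ (i ≤ k+1 ∨ j = 0) := by omega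
    simp only [hiff]

-- port A computes g F T N M
theorem tourist_eq_g (n m : Int) (hn : 0 ≤ n) (hm : 0 ≤ m) (F T : List (List Int)) :
    tourist n m F T = g F T n.toNat m.toNat := by
  rw [tourist, if_neg (by omega)]
  obtain ⟨_, hv⟩ := stage3 F T n.toNat m.toNat n.toNat le_rfl
  rw [hv n.toNat le_rfl m.toNat le_rfl, if_pos (Or.inl le_rfl)]

-- B side: the memo invariant — every cached value is the corresponding g value
def Good (F T : List (List Int)) (d : PySem.Dict (Nat × Nat) Int) : Prop :=
  ∀ a b v, d.get? (a, b) = some v → v = g F T a b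

theorem Good_empty (F T : List (List Int)) : Good F T PySem.Dict.empty := by
  intro a b v h
  simp [PySem.Dict.get?_empty] at h

theorem Good_insert (F T : List (List Int)) (d : PySem.Dict (Nat × Nat) Int)
    (i j : Nat) (v : Int) (hd : Good F T d) (hv : v = g F T i j) :
    Good F T (d.insert (i, j) v) := by
  intro a b w h
  rw [PySem.Dict.get?_insert] at h
  split_ifs at h with hab
  · obtain ⟨rfl, rfl⟩ := Prod.mk.injEq .. ▸ Prod.ext_iff.mp hab
    exact (Option.some.injEq .. ▸ h) ▸ hv
  · exact hd a b w h

-- B side: the memoized recursion returns g and preserves the invariant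
theorem fB_spec (F T : List (List Int)) :
    ∀ K i j (d : PySem.Dict (Nat × Nat) Int), i + j ≤ K → Good F T d →
      (fB F T i j d).1 = g F T i j ∧ Good F T (fB F T i j d).2 := by
  intro K
  induction K with
  | zero =>
    intro i j d hK hd
    have hi : i = 0 := by omega
    have hj : j = 0 := by omega
    subst hi; subst hj
    rw [fB]
    cases hget : d.get? (0, 0) with
    | some v =>
      exact ⟨hd 0 0 v hget, hd⟩
    | none =>
      rw [dif_pos (show (0:Nat) = 0 ∧ (0:Nat) = 0 from ⟨rfl, rfl⟩)]
      exact ⟨by simp [g], Good_insert F T d 0 0 0 hd (by simp [g])⟩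
  | succ K ih =>
    intro i j d hK hd
    rw [fB]
    cases hget : d.get? (i, j) with
    | some v =>
      exact ⟨hd i j v hget, hd⟩
    | none =>
      by_cases h0 : i = 0 ∧ j = 0
      · obtain ⟨rfl, rfl⟩ := h0
        rw [dif_pos (show (0:Nat) = 0 ∧ (0:Nat) = 0 from ⟨rfl, rfl⟩)]
        exact ⟨by simp [g], Good_insert F T d 0 0 0 hd (by simp [g])⟩
      · rw [dif_neg h0]
        by_cases hj : j = 0
        · subst hj
          rw [dif_pos rfl]
          obtain ⟨hp1, hp2⟩ := ih (i - 1) 0 d (by omega) hd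
          have hi0 : i ≠ 0 := fun hc => h0 ⟨hc, rfl⟩
          have hgi : g F T i 0 = g F T (i - 1) 0 + get2 F (i - 1) 0 := by
            obtain ⟨i', rfl⟩ := Nat.exists_eq_succ_of_ne_zero hi0
            simp [g]
          refine ⟨?_, ?_⟩
          · simp only [hp1, hgi]
          · exact Good_insert F T _ i 0 _ hp2 (by simp only [hp1, hgi])
        · rw [dif_neg hj]
          by_cases hi : i = 0
          · subst hi
            rw [dif_pos rfl]
            obtain ⟨hp1, hp2⟩ := ih 0 (j - 1) d (by omega) hd
            have hgj : g F T 0 j = g F T 0 (j - 1) + get2 T 0 (j - 1) := by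
              obtain ⟨j', rfl⟩ := Nat.exists_eq_succ_of_ne_zero hj
              simp [g]
            refine ⟨?_, ?_⟩
            · simp only [hp1, hgj]
            · exact Good_insert F T _ 0 j _ hp2 (by simp only [hp1, hgj])
          · rw [dif_neg hi]
            obtain ⟨hp1, hp2⟩ := ih (i - 1) j d (by omega) hd
            obtain ⟨hq1, hq2⟩ := ih i (j - 1) (fB F T (i - 1) j d).2 (by omega) hp2
            have hg : g F T i j
                = max (g F T (i - 1) j + get2 F (i - 1) j) (g F T i (j - 1) + get2 T i (j - 1)) := by
              obtain ⟨i', rfl⟩ := Nat.exists_eq_succ_of_ne_zero hi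
              obtain ⟨j', rfl⟩ := Nat.exists_eq_succ_of_ne_zero hj
              simp [g]
            refine ⟨?_, ?_⟩
            · simp only [hp1, hq1, hg]
            · exact Good_insert F T _ i j _ hq2 (by simp only [hp1, hq1, hg])

-- port B computes g F T N M
theorem tourist_alt_eq_g (n m : Int) (hn : 0 ≤ n) (hm : 0 ≤ m) (F T : List (List Int)) :
    tourist_alt n m F T = g F T n.toNat m.toNat := by
  rw [tourist_alt, if_neg (by omega)]
  exact (fB_spec F T (n.toNat + m.toNat) n.toNat m.toNat PySem.Dict.empty le_rfl (Good_empty F T)).1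

-- ===== VERDICT (by name: the statement is the Claim_ definition above) =====
theorem tourist_spec : Claim_equal_tourist := by
  intro n m falsee truee _ hpre
  obtain ⟨hn, hm, -, -⟩ := hpre
  unfold Spec_tourist
  rw [tourist_eq_g n m hn hm, tourist_alt_eq_g n m hn hm]
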